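-- pv_equiv track=rewrite | github.com/WONDO-K/TIL | algorithm/swea/2024-02-27/swea_16891.py | run_check
-- ===== SOURCE A (Python) =====
-- def run_check(arr):
--     arr.sort()
--     cnt=1
--     for i in range(len(arr)-1):
--         if arr[i]+1 == arr[i+1]:
--             cnt+=1
--         else:
--             cnt=1
--     if cnt==3:
--         return True
--     return False
-- ===== SOURCE B (Python) =====
-- # Tail check: after sorting in place, the loop's final counter is just the length of the
-- # trailing consecutive run, so inspect only the last four elements. (Mutates arr like A: in-place sort.)
-- def run_check(arr):
--     arr.sort()
--     n = len(arr)
--     return (n >= 3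
--             and arr[-3] + 1 == arr[-2]
--             and arr[-2] + 1 == arr[-1]
--             and (n < 4 or arr[-4] + 1 != arr[-3]))
-- ===== Notes on version B (the rewrite author's own statement) =====
-- stated objective: simpler
-- what changed: Replaces the full run-counting scan after the sort with a constant-size tail check (the loop's final counter is just the trailing consecutive-run length, so only the last four elements matter).
import Mathlib
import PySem

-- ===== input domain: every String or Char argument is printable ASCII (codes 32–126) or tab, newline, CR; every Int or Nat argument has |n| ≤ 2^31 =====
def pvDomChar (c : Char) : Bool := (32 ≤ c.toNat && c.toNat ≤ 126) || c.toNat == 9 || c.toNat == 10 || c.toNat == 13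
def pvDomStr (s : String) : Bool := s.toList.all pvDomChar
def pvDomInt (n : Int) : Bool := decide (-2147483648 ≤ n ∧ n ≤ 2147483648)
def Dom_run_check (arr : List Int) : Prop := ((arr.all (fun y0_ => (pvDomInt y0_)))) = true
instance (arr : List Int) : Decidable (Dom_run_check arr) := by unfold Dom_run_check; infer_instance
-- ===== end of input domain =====

-- B replaces A's full run-counting scan by a constant-size tail check after the same sort.
-- Both Pythons sort `arr` in place (the same mutation); the equivalence proved is about the return value.

-- ===== PORT A =====
-- the scan: cnt=1; for i in range(len(arr)-1): cnt = cnt+1 if arr[i]+1==arr[i+1] else 1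
-- (indices produced by range(len(s)-1) are always in range, so pyGetD's default 0 is never used)
def pvLoopCnt (s : List Int) : Int :=
  (PySem.List.pyRange 0 ((s.length : Int) - 1) 1).foldl
    (fun cnt i =>
      if PySem.List.pyGetD s i 0 + 1 = PySem.List.pyGetD s (i + 1) 0 then cnt + 1 else 1) 1

def run_check (arr : List Int) : Bool :=
  let s := PySem.List.sorted arr (fun x => x) false
  pvLoopCnt s == 3

-- ===== PORT B =====
-- tail check on the sorted list; Python's `and`/`or` short-circuit so the negative indices are
-- only evaluated when in range (pyGetD's default 0 is never used on a reached access)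
def pvTailChk (s : List Int) : Bool :=
  let n : Int := s.length
  decide (3 ≤ n) &&
    (PySem.List.pyGetD s (-3) 0 + 1 == PySem.List.pyGetD s (-2) 0) &&
    (PySem.List.pyGetD s (-2) 0 + 1 == PySem.List.pyGetD s (-1) 0) &&
    (decide (n < 4) || !(PySem.List.pyGetD s (-4) 0 + 1 == PySem.List.pyGetD s (-3) 0))

def run_check_alt (arr : List Int) : Bool :=
  let s := PySem.List.sorted arr (fun x => x) false
  pvTailChk s

-- ===== PRECONDITION & SPEC =====
def Spec_run_check (arr : List Int) (out : Bool) : Prop := out = run_check_alt arr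
instance (arr : List Int) (out : Bool) : Decidable (Spec_run_check arr out) := by unfold Spec_run_check; infer_instance

-- ===== CLAIM (what is proved, stated in full; the proofs are below) =====
def Claim_equal_run_check : Prop := ∀ (arr : List Int), Dom_run_check arr → Spec_run_check arr (run_check arr)

-- ===== LEMMAS AND PROOFS =====

theorem pvLoopCnt_singleton (x : Int) : pvLoopCnt [x] = 1 := by
  simp [pvLoopCnt, PySem.List.pyRange_one_eq_nil]

-- one trip round the loop: the last index compares the last two elements
theorem pvLoopCnt_snoc (t : List Int) (y x : Int) :
    pvLoopCnt ((t ++ [y]) ++ [x]) =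
      if y + 1 = x then pvLoopCnt (t ++ [y]) + 1 else 1 := by
  have hlen : (((t ++ [y]) ++ [x]).length : Int) - 1 = ((t.length : Int) + 1) := by
    simp; omega
  have hsplit : PySem.List.pyRange 0 ((t.length : Int) + 1) 1
      = PySem.List.pyRange 0 (t.length : Int) 1 ++ [(t.length : Int)] := by
    exact PySem.List.pyRange_one_succ_right (by positivity)
  unfold pvLoopCnt
  rw [hlen, hsplit, List.foldl_append]
  have hcongr : ∀ (acc : Int) (i : Int), i ∈ PySem.List.pyRange 0 (t.length : Int) 1 →
      (fun cnt i => if PySem.List.pyGetD ((t ++ [y]) ++ [x]) i 0 + 1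
          = PySem.List.pyGetD ((t ++ [y]) ++ [x]) (i + 1) 0 then cnt + 1 else (1:Int)) acc i
      = (fun cnt i => if PySem.List.pyGetD (t ++ [y]) i 0 + 1
          = PySem.List.pyGetD (t ++ [y]) (i + 1) 0 then cnt + 1 else (1:Int)) acc i := by
    intro acc i hi
    rw [PySem.List.mem_pyRange_one] at hi
    have h0 : (0:Int) ≤ i := hi.1
    have h1 : i < (t.length : Int) := hi.2
    simp only [PySem.List.pyGetD_of_nonneg _ _ h0,
      PySem.List.pyGetD_of_nonneg _ _ (by omega : (0:Int) ≤ i + 1)]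
    have hi1 : i.toNat < (t ++ [y]).length := by simp; omega
    have hi2 : (i+1).toNat < (t ++ [y]).length := by simp; omega
    rw [List.getD_eq_getElem _ _ (by simp; omega), List.getD_eq_getElem _ _ (by simp; omega),
        List.getD_eq_getElem _ _ hi1, List.getD_eq_getElem _ _ hi2,
        List.getElem_append_left hi1, List.getElem_append_left hi2]
  have hpre : List.foldl
      (fun cnt i => if PySem.List.pyGetD ((t ++ [y]) ++ [x]) i 0 + 1
          = PySem.List.pyGetD ((t ++ [y]) ++ [x]) (i + 1) 0 then cnt + 1 else (1:Int)) 1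
      (PySem.List.pyRange 0 (t.length : Int) 1)
      = List.foldl (fun cnt i => if PySem.List.pyGetD (t ++ [y]) i 0 + 1
          = PySem.List.pyGetD (t ++ [y]) (i + 1) 0 then cnt + 1 else (1:Int)) 1
      (PySem.List.pyRange 0 (t.length : Int) 1) :=
    PySem.List.foldl_congr_mem _ _ _ _ (fun acc i hi => hcongr acc i hi)
  rw [hpre]
  have hlast1 : PySem.List.pyGetD ((t ++ [y]) ++ [x]) (t.length : Int) 0 = y := by
    rw [show ((t ++ [y]) ++ [x]) = t ++ (y :: [x]) by simp, PySem.List.pyGetD,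
        PySem.List.pyGet?_append_length]
    rfl
  have hlast2 : PySem.List.pyGetD ((t ++ [y]) ++ [x]) ((t.length : Int) + 1) 0 = x := by
    rw [show ((t ++ [y]) ++ [x]) = (t ++ [y]) ++ (x :: []) from rfl, PySem.List.pyGetD,
        show ((t.length : Int) + 1) = (((t ++ [y]).length : Nat) : Int) by simp,
        PySem.List.pyGet?_append_length]
    rfl
  have hlen2 : ((t ++ [y]).length : Int) - 1 = (t.length : Int) := by simp
  simp only [List.foldl_cons, List.foldl_nil, hlast1, hlast2]
  rw [hlen2]

theorem pvLoopCnt_pos (s : List Int) : 1 ≤ pvLoopCnt s := by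
  induction s using List.reverseRecOn with
  | nil => decide
  | append_singleton t x ih =>
    induction t using List.reverseRecOn with
    | nil => simp [pvLoopCnt_singleton]
    | append_singleton u y _ =>
      rw [pvLoopCnt_snoc]
      split
      · omega
      · omega

theorem pvTailChk_short (s : List Int) (h : s.length < 3) : pvTailChk s = false := by
  simp only [pvTailChk]
  simp
  intro h3 _ _
  omega

-- negative tail indices of u ++ [z, a, b]
theorem pvGet_tail (u : List Int) (z a b : Int) :
    PySem.List.pyGetD (u ++ [z, a, b]) (-1) 0 = b ∧
    PySem.List.pyGetD (u ++ [z, a, b]) (-2) 0 = a ∧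
    PySem.List.pyGetD (u ++ [z, a, b]) (-3) 0 = z := by
  have hlen : (u ++ [z, a, b]).length = u.length + 3 := by simp
  refine ⟨?_, ?_, ?_⟩
  · rw [PySem.List.pyGetD, PySem.List.pyGet?_neg_ofNat _ 1 (by omega) (by omega)]
    rw [hlen]
    simp
  · rw [PySem.List.pyGetD, PySem.List.pyGet?_neg_ofNat _ 2 (by omega) (by omega)]
    rw [hlen]
    simp
  · rw [PySem.List.pyGetD, PySem.List.pyGet?_neg_ofNat _ 3 (by omega) (by omega)]
    rw [hlen]
    simp

theorem pvGet_neg4 (u : List Int) (w z a b : Int) :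
    PySem.List.pyGetD ((u ++ [w]) ++ [z, a, b]) (-4) 0 = w := by
  have hlen : ((u ++ [w]) ++ [z, a, b]).length = u.length + 4 := by simp
  rw [PySem.List.pyGetD, PySem.List.pyGet?_neg_ofNat _ 4 (by omega) (by omega)]
  rw [hlen]
  have : u.length + 4 - 4 = u.length := by omega
  rw [this]
  rw [show (u ++ [w]) ++ [z, a, b] = u ++ ([w] ++ [z, a, b]) by simp]
  simp

-- the heart: on ANY list the loop counter equals 3 exactly when the tail check fires
theorem pvKey (s : List Int) : (pvLoopCnt s == 3) = pvTailChk s := by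
  induction s using List.reverseRecOn with
  | nil => decide
  | append_singleton t b _ =>
  induction t using List.reverseRecOn with
  | nil =>
    rw [pvTailChk_short _ (by simp)]
    simp [pvLoopCnt_singleton]
  | append_singleton t' a _ =>
  induction t' using List.reverseRecOn with
  | nil =>
    rw [show ([] ++ [a]) ++ [b] = [] ++ [a] ++ [b] from rfl, pvLoopCnt_snoc,
        pvTailChk_short _ (by simp)]
    simp only [List.nil_append, pvLoopCnt_singleton]
    split <;> decide
  | append_singleton u z _ =>
    -- s = (u ++ [z] ++ [a]) ++ [b] = u ++ [z, a, b]
    have hs : ((u ++ [z]) ++ [a]) ++ [b] = u ++ [z, a, b] := by simp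
    rw [pvLoopCnt_snoc, pvLoopCnt_snoc, hs]
    obtain ⟨h1, h2, h3⟩ := pvGet_tail u z a b
    have hlen : ((u ++ [z, a, b]).length : Int) = (u.length : Int) + 3 := by
      simp
    unfold pvTailChk
    simp only [h1, h2, h3, hlen]
    induction u using List.reverseRecOn with
    | nil =>
      simp only [List.nil_append, pvLoopCnt_singleton]
      by_cases hab : a + 1 = b <;> by_cases hza : z + 1 = a <;>
        simp [hab, hza]
    | append_singleton v w _ =>
      rw [pvGet_neg4 v w z a b]
      have hp := pvLoopCnt_pos (v ++ [w])
      rw [pvLoopCnt_snoc]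
      by_cases hab : a + 1 = b <;> by_cases hza : z + 1 = a <;> by_cases hwz : w + 1 = z <;>
        simp [hab, hza, hwz] <;> (try omega) <;>
          (rw [show ((pvLoopCnt (v ++ [w]) + 1 + 1 + 1 : Int) == 3) = false by
                rw [beq_eq_false_iff_ne]; omega]
           simp
           omega)

-- ===== VERDICT (by name: the statement is the Claim_ definition above) =====
theorem run_check_spec : Claim_equal_run_check := by
  intro arr _
  show run_check arr = run_check_alt arr
  unfold run_check run_check_alt
  exact pvKey _
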